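-- pv_equiv track=rewrite | github.com/Fergana-Labs/stash | evals/stash/harness/metrics.py | _count_rediscovery
-- ===== SOURCE A (Python) =====
-- REDISCOVERY_TOOLS = {"Grep", "Read", "Glob"}
--
-- def _count_rediscovery(seq: list[tuple[str, dict]], touched_paths: list[str]) -> int:
--     """Count Grep/Read calls that target a file Session A already touched."""
--     count = 0
--     for tool, inp in seq:
--         if tool not in REDISCOVERY_TOOLS:
--             continue
--         target = inp.get("file_path") or inp.get("path") or inp.get("pattern") or ""
--         for p in touched_paths:
--             if p in target:
--                 count += 1
--                 break
--     return count
-- ===== SOURCE B (Python) =====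
-- REDISCOVERY_TOOLS = {"Grep", "Read", "Glob"}
--
--
-- def _count_rediscovery(seq, touched_paths):
--     # Sieve with inverted loop nesting: collect the targets of the
--     # rediscovery calls, then let each touched path make ONE filtering pass
--     # that eliminates the targets containing it; whatever survives every
--     # pass matched no path, so the answer is total minus survivors.
--     targets = [inp.get("file_path") or inp.get("path") or inp.get("pattern") or ""
--                for tool, inp in seq if tool in REDISCOVERY_TOOLS]
--     remaining = targets
--     for p in touched_paths:
--         remaining = [t for t in remaining if p not in t]
--     return len(targets) - len(remaining)
-- ===== Notes on version B (the rewrite author's own statement) =====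
-- stated objective: alternative
-- what changed: B inverts the loop nesting: it collects the rediscovery targets, then sieves that list with one filtering pass per touched path (each pass removes targets containing that path) and returns total minus survivors, instead of A's single pass over calls with an inner break-scan of touched_paths per call.
import Mathlib
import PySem

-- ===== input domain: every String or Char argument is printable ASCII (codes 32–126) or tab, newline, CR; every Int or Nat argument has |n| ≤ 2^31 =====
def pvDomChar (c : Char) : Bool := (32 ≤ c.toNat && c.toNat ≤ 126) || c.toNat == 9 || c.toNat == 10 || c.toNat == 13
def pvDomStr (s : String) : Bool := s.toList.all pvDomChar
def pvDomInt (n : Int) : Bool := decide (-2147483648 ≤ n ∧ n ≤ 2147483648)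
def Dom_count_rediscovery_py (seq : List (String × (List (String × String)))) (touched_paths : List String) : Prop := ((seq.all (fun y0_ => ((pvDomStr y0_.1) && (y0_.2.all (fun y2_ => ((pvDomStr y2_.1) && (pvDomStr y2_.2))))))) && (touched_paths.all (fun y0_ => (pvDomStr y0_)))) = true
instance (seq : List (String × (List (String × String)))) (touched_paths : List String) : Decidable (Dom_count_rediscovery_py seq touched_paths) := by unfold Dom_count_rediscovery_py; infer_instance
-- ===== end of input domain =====

-- B inverts the loop nesting: it sieves the collected target list with one filtering pass
-- per touched path and returns total minus survivors (objective: alternative).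

-- ===== PORT A =====
def pvRediscoveryTools : List String := PySem.Set.ofList ["Grep", "Read", "Glob"]

-- Python 'x or y' on Optional[str]/str: falsy = None or "".
def pvOrStr (a : Option String) (b : String) : String :=
  match a with
  | some s => if s = "" then b else s
  | none => b

-- target = inp.get("file_path") or inp.get("path") or inp.get("pattern") or ""
def pvTargetA (inp : List (String × String)) : String :=
  pvOrStr (inp.lookup "file_path") (pvOrStr (inp.lookup "path") (pvOrStr (inp.lookup "pattern") ""))

-- inner 'for p in touched_paths: if p in target: count += 1; break' → first-match scan
def pvHitA (paths : List String) (target : String) : Bool :=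
  paths.any (fun p => PySem.Str.isIn p target)

def count_rediscovery_py (seq : List (String × (List (String × String)))) (touched_paths : List String) : Int :=
  seq.foldl
    (fun count x =>
      if PySem.Set.contains pvRediscoveryTools x.1 then
        (if pvHitA touched_paths (pvTargetA x.2) then count + 1 else count)
      else count)
    0

-- ===== PORT B =====
def pvTargetB (inp : List (String × String)) : String :=
  pvOrStr (inp.lookup "file_path") (pvOrStr (inp.lookup "path") (pvOrStr (inp.lookup "pattern") ""))

-- targets = [... for tool, inp in seq if tool in REDISCOVERY_TOOLS]
def pvTargetsB (seq : List (String × (List (String × String)))) : List String :=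
  seq.filterMap (fun x => if PySem.Set.contains pvRediscoveryTools x.1 then some (pvTargetB x.2) else none)

-- for p in touched_paths: remaining = [t for t in remaining if p not in t]
def pvSieveB (touched_paths : List String) (targets : List String) : List String :=
  touched_paths.foldl (fun r p => r.filter (fun t => !(PySem.Str.isIn p t))) targets

def count_rediscovery_py_alt (seq : List (String × (List (String × String)))) (touched_paths : List String) : Int :=
  let targets := pvTargetsB seq
  let remaining := pvSieveB touched_paths targets
  (targets.length : Int) - (remaining.length : Int)

-- ===== PRECONDITION & SPEC =====
def Spec_count_rediscovery_py (seq : List (String × (List (String × String)))) (touched_paths : List String) (out : Int) : Prop := out = count_rediscovery_py_alt seq touched_paths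
instance (seq : List (String × (List (String × String)))) (touched_paths : List String) (out : Int) : Decidable (Spec_count_rediscovery_py seq touched_paths out) := by unfold Spec_count_rediscovery_py; infer_instance

-- ===== CLAIM (what is proved, stated in full; the proofs are below) =====
def Claim_equal_count_rediscovery_py : Prop := ∀ (seq : List (String × (List (String × String)))) (touched_paths : List String), Dom_count_rediscovery_py seq touched_paths → Spec_count_rediscovery_py seq touched_paths (count_rediscovery_py seq touched_paths)

-- ===== LEMMAS AND PROOFS =====

-- A's counting fold, with the nested ifs fused into one boolean condition
lemma pvFoldA_eq (seq : List (String × (List (String × String)))) (tp : List String) :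
    seq.foldl
      (fun count x =>
        if PySem.Set.contains pvRediscoveryTools x.1 then
          (if pvHitA tp (pvTargetA x.2) then count + 1 else count)
        else count) (0 : Int)
    = seq.foldl
      (fun count x =>
        if PySem.Set.contains pvRediscoveryTools x.1 && pvHitA tp (pvTargetA x.2)
        then count + 1 else count) (0 : Int) := by
  apply List.foldl_ext
  intro c x _
  by_cases h1 : PySem.Set.contains pvRediscoveryTools x.1 = true
  · by_cases h2 : pvHitA tp (pvTargetA x.2) = true
    · rw [h1, h2]; rfl
    · rw [h1, Bool.eq_false_iff.mpr h2]; rfl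
  · rw [Bool.eq_false_iff.mpr h1]; rfl

-- counting over the filtered target list = counting over seq with the fused condition
lemma pvCountP_targets (seq : List (String × (List (String × String)))) (f : String → Bool) :
    (pvTargetsB seq).countP f
      = seq.countP (fun x => PySem.Set.contains pvRediscoveryTools x.1 && f (pvTargetB x.2)) := by
  induction seq with
  | nil => rfl
  | cons x xs ih =>
    unfold pvTargetsB at *
    by_cases h : PySem.Set.contains pvRediscoveryTools x.1 = true
    · simp only [List.filterMap_cons, h, if_pos, List.countP_cons, ih, Bool.true_and]
    · simp only [List.filterMap_cons, Bool.eq_false_iff.mpr h, Bool.false_and,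
        List.countP_cons, ih, Bool.false_eq_true, if_false, add_zero]

-- the path-by-path sieve equals one filter keeping the targets no path occurs in
lemma pvSieveB_eq (tp : List String) (ts : List String) :
    pvSieveB tp ts = ts.filter (fun t => tp.all (fun p => !(PySem.Str.isIn p t))) := by
  unfold pvSieveB
  induction tp generalizing ts with
  | nil => simp
  | cons p ps ih =>
    simp only [List.foldl_cons, ih, List.filter_filter, List.all_cons]
    apply List.filter_congr
    intro t _
    cases PySem.Str.isIn p t <;> simp

-- ===== VERDICT (by name: the statement is the Claim_ definition above) =====
theorem count_rediscovery_py_spec : Claim_equal_count_rediscovery_py := by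
  intro seq tp _
  unfold Spec_count_rediscovery_py count_rediscovery_py count_rediscovery_py_alt
  show _ = ((pvTargetsB seq).length : Int) - ((pvSieveB tp (pvTargetsB seq)).length : Int)
  rw [pvFoldA_eq, PySem.List.foldl_if_add_one, zero_add, pvSieveB_eq,
    ← List.countP_eq_length_filter]
  have hsplit :
      (pvTargetsB seq).countP (fun t => pvHitA tp t)
        + (pvTargetsB seq).countP (fun t => tp.all (fun p => !(PySem.Str.isIn p t)))
      = (pvTargetsB seq).length := by
    rw [List.length_eq_countP_add_countP (p := fun t => pvHitA tp t) (l := pvTargetsB seq)]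
    congr 1
    apply List.countP_congr
    intro t _
    unfold pvHitA
    cases h : tp.any (fun p => PySem.Str.isIn p t) <;> simp_all [List.all_eq_not_any_not]
  have hA : seq.countP
      (fun x => PySem.Set.contains pvRediscoveryTools x.1 && pvHitA tp (pvTargetA x.2))
      = (pvTargetsB seq).countP (fun t => pvHitA tp t) := by
    rw [pvCountP_targets seq (fun t => pvHitA tp t)]
    rfl
  rw [hA]
  omega
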